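-- pv_equiv track=rewrite | github.com/meyerpolancoEDU/algs-assignment-3 | main.py | med_top_down
-- ===== SOURCE A (Python) =====
-- def med_top_down(S, T, MED={}):
--     ## look up the memory
--     if (S, T) in MED:
--         return MED[(S, T)]
--     ## base cases
--     if (S == ""):
--         return(len(T))
--     elif (T == ""):
--         return(len(S))
--     ## recursive cases
--     if S[0] == T[0]:  # If first characters are the same, move to the next
--         MED[(S, T)] = med_top_down(S[1:], T[1:], MED)
--     else:
--         insert = med_top_down(S, T[1:], MED) + 1  # Insert a character
--         delete = med_top_down(S[1:], T, MED) + 1  # Delete a character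
--         MED[(S, T)] = min(insert, delete)
--
--     return MED[(S, T)]
-- ===== SOURCE B (Python) =====
-- def med_top_down(S, T, MED={}):
--     # Bottom-up DP over suffix indices (honours entries already present in the MED
--     # memo, like the top-down version); unlike A it does not mutate MED.
--     n, m = len(S), len(T)
--     Ssuf = [S[i:] for i in range(n + 1)]
--     Tsuf = [T[j:] for j in range(m + 1)]
--     prev = []
--     for i in range(n, -1, -1):
--         row = [0] * (m + 1)
--         for j in range(m, -1, -1):
--             c = MED.get((Ssuf[i], Tsuf[j]))
--             if c is not None:
--                 row[j] = c
--             elif i == n: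
--                 row[j] = m - j
--             elif j == m:
--                 row[j] = n - i
--             elif S[i] == T[j]:
--                 row[j] = prev[j + 1]
--             else:
--                 row[j] = 1 + min(row[j + 1], prev[j])
--         prev = row
--     return prev[0]
-- ===== Notes on version B (the rewrite author's own statement) =====
-- stated objective: faster
-- what changed: Replaces the memoized top-down recursion on string suffixes with an index-based bottom-up DP that fills a row at a time (consulting the caller-supplied MED memo the same way), avoiding recursion and repeated string slicing in the recurrence.
import Mathlib
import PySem

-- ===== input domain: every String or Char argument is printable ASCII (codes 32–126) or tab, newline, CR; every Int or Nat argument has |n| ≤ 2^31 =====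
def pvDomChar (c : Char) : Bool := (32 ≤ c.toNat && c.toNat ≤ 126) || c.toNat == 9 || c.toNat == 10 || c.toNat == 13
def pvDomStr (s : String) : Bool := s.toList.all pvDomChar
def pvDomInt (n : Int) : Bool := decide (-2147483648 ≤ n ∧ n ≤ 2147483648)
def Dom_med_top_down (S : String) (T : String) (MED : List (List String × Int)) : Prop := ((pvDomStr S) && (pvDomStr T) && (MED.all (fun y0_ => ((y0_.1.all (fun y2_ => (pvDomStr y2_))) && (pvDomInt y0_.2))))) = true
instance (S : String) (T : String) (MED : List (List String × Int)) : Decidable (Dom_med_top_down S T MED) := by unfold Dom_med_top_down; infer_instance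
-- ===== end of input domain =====

-- B replaces A's memoized top-down recursion on string suffixes by an index-based
-- bottom-up DP (same MED-memo consultation); equivalence is about the RETURN value
-- only: Python A mutates the MED dict it is given, B does not.

-- ===== PORT A =====
-- A's memo is threaded as explicit state (Python mutates the dict in place).
-- The final 'return MED[(S, T)]' reads back exactly the value just stored, so the
-- port returns that value directly.
def medAAux (S T : List Char) (M : PySem.Dict (List String) Int) :
    Int × PySem.Dict (List String) Int :=
  match M.get? [String.ofList S, String.ofList T] with
  | some v => (v, M)
  | none =>
    match S, T with
    | [], T => ((T.length : Int), M)
    | S, [] => ((S.length : Int), M)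
    | a :: S', b :: T' =>
      if a = b then
        let r := medAAux S' T' M
        (r.1, r.2.insert [String.ofList (a :: S'), String.ofList (b :: T')] r.1)
      else
        let ri := medAAux (a :: S') T' M
        let rd := medAAux S' (b :: T') ri.2
        let v := min (ri.1 + 1) (rd.1 + 1)
        (v, rd.2.insert [String.ofList (a :: S'), String.ofList (b :: T')] v)
termination_by S.length + T.length
decreasing_by all_goals (simp [List.length_cons]; try omega)

def med_top_down (S : String) (T : String) (MED : List (List String × Int)) : Int :=
  (medAAux S.toList T.toList (PySem.Dict.ofList MED)).1

-- ===== PORT B =====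
-- inner loop 'for j in range(m, -1, -1)': builds row entries j..m back-to-front;
-- row[j+1] is the head of the already-built tail.
def altRowFrom (M : PySem.Dict (List String) Int) (Ssuf Tsuf : List String)
    (SL TL : List Char) (n m i : Nat) (prev : List Int) (j : Nat) : List Int :=
  if _h : j ≤ m then
    let rest := altRowFrom M Ssuf Tsuf SL TL n m i prev (j + 1)
    -- 'c = MED.get(key); row[j] = c if c is not None else …'
    let v : Int :=
      (M.get? [Ssuf.getD i "", Tsuf.getD j ""]).getD
        (if i = n then (m : Int) - (j : Int)
         else if j = m then (n : Int) - (i : Int)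
         else if SL.getD i ' ' = TL.getD j ' ' then prev.getD (j + 1) 0
         else 1 + min (rest.getD 0 0) (prev.getD j 0))
    v :: rest
  else []
termination_by m + 1 - j

-- outer loop 'for i in range(n, -1, -1)': prev carried from level i+1 to level i.
def altRowsFrom (M : PySem.Dict (List String) Int) (Ssuf Tsuf : List String)
    (SL TL : List Char) (n m i : Nat) : List Int :=
  if _h : i ≤ n then
    altRowFrom M Ssuf Tsuf SL TL n m i (altRowsFrom M Ssuf Tsuf SL TL n m (i + 1)) 0
  else []
termination_by n + 1 - i

def med_top_down_alt (S : String) (T : String) (MED : List (List String × Int)) : Int :=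
  let SL := S.toList
  let TL := T.toList
  let n := SL.length
  let m := TL.length
  let M := PySem.Dict.ofList MED
  let Ssuf := (List.range (n + 1)).map (fun i => String.ofList (SL.drop i))
  let Tsuf := (List.range (m + 1)).map (fun j => String.ofList (TL.drop j))
  (altRowsFrom M Ssuf Tsuf SL TL n m 0).getD 0 0

-- ===== PRECONDITION & SPEC =====
def Spec_med_top_down (S : String) (T : String) (MED : List (List String × Int)) (out : Int) : Prop := out = med_top_down_alt S T MED
instance (S : String) (T : String) (MED : List (List String × Int)) (out : Int) : Decidable (Spec_med_top_down S T MED out) := by unfold Spec_med_top_down; infer_instance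

-- ===== CLAIM (what is proved, stated in full; the proofs are below) =====
def Claim_equal_med_top_down : Prop := ∀ (S : String) (T : String) (MED : List (List String × Int)), Dom_med_top_down S T MED → Spec_med_top_down S T MED (med_top_down S T MED)

-- ===== LEMMAS AND PROOFS =====

-- pure reference recurrence: lookups against the FIXED initial memo M0
def gSpec (M0 : PySem.Dict (List String) Int) (S T : List Char) : Int :=
  match M0.get? [String.ofList S, String.ofList T] with
  | some v => v
  | none =>
    match S, T with
    | [], T => ((T.length : Int))
    | S, [] => ((S.length : Int))
    | a :: S', b :: T' =>
      if a = b then gSpec M0 S' T'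
      else min (gSpec M0 (a :: S') T' + 1) (gSpec M0 S' (b :: T') + 1)
termination_by S.length + T.length
decreasing_by all_goals (simp [List.length_cons]; try omega)

-- A's memo state is always the initial M0 extended with correct gSpec values
def MemoExt (M0 M : PySem.Dict (List String) Int) : Prop :=
  (∀ k v, M0.get? k = some v → M.get? k = some v) ∧
  (∀ k v, M.get? k = some v →
    M0.get? k = some v ∨
      ∃ X Y, k = [String.ofList X, String.ofList Y] ∧ M0.get? k = none ∧ v = gSpec M0 X Y)

lemma memoExt_refl (M0 : PySem.Dict (List String) Int) : MemoExt M0 M0 :=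
  ⟨fun _ _ h => h, fun _ _ h => Or.inl h⟩

lemma memoExt_insert (M0 M : PySem.Dict (List String) Int) (X Y : List Char)
    (hE : MemoExt M0 M) (h0 : M0.get? [String.ofList X, String.ofList Y] = none) :
    MemoExt M0 (M.insert [String.ofList X, String.ofList Y] (gSpec M0 X Y)) := by
  obtain ⟨h1, h2⟩ := hE
  constructor
  · intro k v hk
    rw [PySem.Dict.get?_insert]
    split
    · next heq => rw [heq] at hk; rw [h0] at hk; exact absurd hk (by simp)
    · exact h1 k v hk
  · intro k v hk
    rw [PySem.Dict.get?_insert] at hk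
    split at hk
    · next heq =>
      refine Or.inr ⟨X, Y, heq, ?_, ?_⟩
      · rw [heq]; exact h0
      · simpa using hk.symm
    · exact h2 k v hk

lemma gSpec_miss_nilS (M0 : PySem.Dict (List String) Int) (T : List Char)
    (h0 : M0.get? [String.ofList [], String.ofList T] = none) :
    gSpec M0 [] T = (T.length : Int) := by
  rw [gSpec.eq_def, h0]

lemma gSpec_miss_consnil (M0 : PySem.Dict (List String) Int) (a : Char) (S' : List Char)
    (h0 : M0.get? [String.ofList (a :: S'), String.ofList []] = none) :
    gSpec M0 (a :: S') [] = ((a :: S').length : Int) := by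
  rw [gSpec.eq_def, h0]

lemma gSpec_miss_cons (M0 : PySem.Dict (List String) Int) (a b : Char) (S' T' : List Char)
    (h0 : M0.get? [String.ofList (a :: S'), String.ofList (b :: T')] = none) :
    gSpec M0 (a :: S') (b :: T') =
      if a = b then gSpec M0 S' T'
      else min (gSpec M0 (a :: S') T' + 1) (gSpec M0 S' (b :: T') + 1) := by
  rw [gSpec.eq_def, h0]

lemma medAAux_spec (M0 : PySem.Dict (List String) Int) :
    ∀ (n : Nat) (S T : List Char) (M : PySem.Dict (List String) Int),
      S.length + T.length ≤ n → MemoExt M0 M →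
      (medAAux S T M).1 = gSpec M0 S T ∧ MemoExt M0 (medAAux S T M).2 := by
  intro n
  induction n using Nat.strong_induction_on with
  | _ n ih =>
  intro S T M hlen hE
  rw [medAAux.eq_def]
  cases hget : M.get? [String.ofList S, String.ofList T] with
  | some v =>
    refine ⟨?_, hE⟩
    rcases hE.2 _ _ hget with h | ⟨X, Y, hk, h0, hv⟩
    · rw [gSpec.eq_def, h]
    · obtain ⟨hX, hY⟩ : X = S ∧ Y = T := by
        constructor <;> [have := congrArg (fun l => l.getD 0 "") hk;
                         have := congrArg (fun l => l.getD 1 "") hk] <;>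
          simpa [String.ofList_inj] using this.symm
      subst hX; subst hY
      rw [gSpec.eq_def, h0] at hv
      rw [gSpec.eq_def, h0]
      exact hv
  | none =>
    have h0 : M0.get? [String.ofList S, String.ofList T] = none := by
      cases hh : M0.get? [String.ofList S, String.ofList T] with
      | none => rfl
      | some w => have := hE.1 _ _ hh; rw [hget] at this; cases this
    cases S with
    | nil =>
      refine ⟨?_, hE⟩
      rw [gSpec.eq_def, h0]
    | cons a S' =>
      cases T with
      | nil =>
        refine ⟨?_, hE⟩
        rw [gSpec.eq_def, h0]
      | cons b T' =>
        simp only [List.length_cons] at hlen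
        by_cases hab : a = b
        · have IH := ih (n - 1) (by omega) S' T' M (by omega) hE
          have hg : gSpec M0 (a :: S') (b :: T') = gSpec M0 S' T' := by
            rw [gSpec.eq_def, h0]; simp [hab]
          have hins := memoExt_insert M0 (medAAux S' T' M).2 (a :: S') (b :: T') IH.2 h0
          rw [hg] at hins
          constructor
          · rw [hg]; simp [hab, IH.1]
          · simpa [hab, IH.1] using hins
        · have IH1 := ih (n - 1) (by omega) (a :: S') T' M
            (by simp [List.length_cons]; omega) hE
          have IH2 := ih (n - 1) (by omega) S' (b :: T') (medAAux (a :: S') T' M).2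
            (by simp [List.length_cons]; omega) IH1.2
          have hg : gSpec M0 (a :: S') (b :: T') =
              min (gSpec M0 (a :: S') T' + 1) (gSpec M0 S' (b :: T') + 1) := by
            rw [gSpec.eq_def, h0]; simp [hab]
          have hins := memoExt_insert M0
            (medAAux S' (b :: T') (medAAux (a :: S') T' M).2).2 (a :: S') (b :: T') IH2.2 h0
          rw [hg] at hins
          constructor
          · rw [hg]; simp [hab, IH1.1, IH2.1]
          · simpa [hab, IH1.1, IH2.1] using hins

lemma altRowFrom_spec (M0 : PySem.Dict (List String) Int) (SL TL : List Char)
    (i : Nat) (prev : List Int) (hi : i ≤ SL.length)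
    (hprev : i < SL.length →
      prev = (List.range (TL.length + 1)).map (fun j => gSpec M0 (SL.drop (i + 1)) (TL.drop j))) :
    ∀ (k j : Nat), j + k = TL.length + 1 →
      altRowFrom M0 ((List.range (SL.length + 1)).map (fun i => String.ofList (SL.drop i)))
          ((List.range (TL.length + 1)).map (fun j => String.ofList (TL.drop j)))
          SL TL SL.length TL.length i prev j
        = (List.range' j k).map (fun j' => gSpec M0 (SL.drop i) (TL.drop j')) := by
  intro k
  induction k with
  | zero =>
    intro j hj
    rw [altRowFrom.eq_def, dif_neg (by omega)]
    simp
  | succ k ihk =>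
    intro j hj
    have hjm : j ≤ TL.length := by omega
    rw [altRowFrom.eq_def, dif_pos hjm]
    dsimp only []
    rw [ihk (j + 1) (by omega)]
    rw [List.range'_succ, List.map_cons]
    congr 1
    rw [PySem.List.getD_map_range _ _ _ _ (show i < SL.length + 1 by omega),
        PySem.List.getD_map_range _ _ _ _ (show j < TL.length + 1 by omega)]
    cases hg : M0.get? [String.ofList (SL.drop i), String.ofList (TL.drop j)] with
    | some c =>
      rw [Option.getD_some, gSpec.eq_def, hg]
    | none =>
      rw [Option.getD_none]
      by_cases hin : i = SL.length
      · subst hin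
        rw [if_pos rfl]
        rw [List.drop_length] at hg ⊢
        rw [gSpec_miss_nilS M0 _ hg, List.length_drop]
        omega
      · have hilt : i < SL.length := lt_of_le_of_ne hi hin
        have hDS : List.drop i SL = SL[i] :: List.drop (i + 1) SL :=
          List.drop_eq_getElem_cons hilt
        rw [if_neg hin]
        by_cases hjm' : j = TL.length
        · subst hjm'
          rw [if_pos rfl]
          rw [List.drop_length] at hg ⊢
          rw [hDS] at hg ⊢
          rw [gSpec_miss_consnil M0 _ _ hg, List.length_cons, List.length_drop]
          omega
        · have hjlt : j < TL.length := lt_of_le_of_ne hjm hjm'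
          have hDT : List.drop j TL = TL[j] :: List.drop (j + 1) TL :=
            List.drop_eq_getElem_cons hjlt
          rw [if_neg hjm']
          rw [List.getD_eq_getElem SL ' ' hilt, List.getD_eq_getElem TL ' ' hjlt]
          rw [hDS, hDT] at hg
          conv_rhs => rw [hDS, hDT]
          rw [gSpec_miss_cons M0 _ _ _ _ hg]
          rw [hprev hilt]
          by_cases hch : SL[i] = TL[j]
          · rw [if_pos hch, if_pos hch]
            rw [PySem.List.getD_map_range _ _ _ _ (show j + 1 < TL.length + 1 by omega)]
          · rw [if_neg hch, if_neg hch]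
            have hk1 : k = (k - 1) + 1 := by omega
            rw [hk1, List.range'_succ, List.map_cons, List.getD_cons_zero]
            rw [PySem.List.getD_map_range _ _ _ _ (show j < TL.length + 1 by omega)]
            rw [← hDS, ← hDT]
            omega

lemma altRowsFrom_spec (M0 : PySem.Dict (List String) Int) (SL TL : List Char) :
    ∀ (k i : Nat), i + k = SL.length →
      altRowsFrom M0 ((List.range (SL.length + 1)).map (fun i => String.ofList (SL.drop i)))
          ((List.range (TL.length + 1)).map (fun j => String.ofList (TL.drop j)))
          SL TL SL.length TL.length i
        = (List.range (TL.length + 1)).map (fun j => gSpec M0 (SL.drop i) (TL.drop j)) := by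
  intro k
  induction k with
  | zero =>
    intro i hi0
    rw [altRowsFrom.eq_def, dif_pos (by omega)]
    rw [altRowFrom_spec M0 SL TL i _ (by omega)
      (fun h => absurd h (by omega)) (TL.length + 1) 0 (by omega)]
    rw [List.range_eq_range']
  | succ k ihk =>
    intro i hi0
    rw [altRowsFrom.eq_def, dif_pos (by omega)]
    rw [altRowFrom_spec M0 SL TL i _ (by omega)
      (fun _ => ihk (i + 1) (by omega)) (TL.length + 1) 0 (by omega)]
    rw [List.range_eq_range']

-- ===== VERDICT (by name: the statement is the Claim_ definition above) =====
theorem med_top_down_spec : Claim_equal_med_top_down := by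
  intro S T MED _
  unfold Spec_med_top_down med_top_down med_top_down_alt
  have hA := (medAAux_spec (PySem.Dict.ofList MED) (S.toList.length + T.toList.length)
    S.toList T.toList (PySem.Dict.ofList MED) le_rfl (memoExt_refl _)).1
  rw [hA]
  dsimp only []
  rw [altRowsFrom_spec (PySem.Dict.ofList MED) S.toList T.toList S.toList.length 0 (by omega)]
  rw [PySem.List.getD_map_range _ _ _ _ (show 0 < T.toList.length + 1 by omega)]
  rw [List.drop_zero, List.drop_zero]
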